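-- pv_equiv track=rewrite | github.com/BSadioDiallo/Alfy-BootCamp | expressions.py | temp_checker
-- ===== SOURCE A (Python) =====
-- def temp_checker(min_temp, temp_1, temp_2, temp_3):
--     numberOfDay = 0
--     temps = [temp_1, temp_2, temp_3]
--     for i in range(len(temps)):
--         if temps[i] > min_temp:
--             numberOfDay += 1
--
--     if numberOfDay >= 2:
--         return True
--
--     return False
-- ===== SOURCE B (Python) =====
-- def temp_checker(min_temp, temp_1, temp_2, temp_3):
--     a = temp_1 > min_temp
--     b = temp_2 > min_temp
--     c = temp_3 > min_temp
--     return (a and b) or (a and c) or (b and c)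
-- ===== Notes on version B (the rewrite author's own statement) =====
-- stated objective: simpler
-- what changed: Replaced the list-and-counter loop by a closed-form pairwise majority boolean expression over the three comparison flags.
import Mathlib
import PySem

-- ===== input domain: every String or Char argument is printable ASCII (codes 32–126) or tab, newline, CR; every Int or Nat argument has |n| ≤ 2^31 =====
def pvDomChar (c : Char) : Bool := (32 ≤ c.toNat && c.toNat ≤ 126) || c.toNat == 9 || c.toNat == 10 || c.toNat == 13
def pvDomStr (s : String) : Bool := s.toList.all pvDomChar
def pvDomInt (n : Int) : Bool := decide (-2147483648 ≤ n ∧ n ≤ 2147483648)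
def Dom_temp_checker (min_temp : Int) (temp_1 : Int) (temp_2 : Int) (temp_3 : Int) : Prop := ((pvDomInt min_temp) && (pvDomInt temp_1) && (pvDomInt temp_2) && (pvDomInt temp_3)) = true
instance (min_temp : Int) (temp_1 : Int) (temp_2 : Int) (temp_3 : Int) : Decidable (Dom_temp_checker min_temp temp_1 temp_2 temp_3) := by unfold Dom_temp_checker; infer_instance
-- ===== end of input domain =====

-- ===== PORT A =====
-- B replaces the list-and-counter loop by a closed-form pairwise majority expression (simpler).
def temp_checker (min_temp : Int) (temp_1 : Int) (temp_2 : Int) (temp_3 : Int) : Bool :=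
  let numberOfDay : Int := 0
  let temps : List Int := [temp_1, temp_2, temp_3]
  let numberOfDay := (PySem.List.pyRange 0 (temps.length : Int) 1).foldl
    (fun n i => if PySem.List.pyGetD temps i 0 > min_temp then n + 1 else n) numberOfDay
  if numberOfDay ≥ 2 then true else false

-- ===== PORT B =====
def temp_checker_alt (min_temp : Int) (temp_1 : Int) (temp_2 : Int) (temp_3 : Int) : Bool :=
  let a := temp_1 > min_temp
  let b := temp_2 > min_temp
  let c := temp_3 > min_temp
  (a && b) || (a && c) || (b && c)

-- ===== PRECONDITION & SPEC =====
def Spec_temp_checker (min_temp : Int) (temp_1 : Int) (temp_2 : Int) (temp_3 : Int) (out : Bool) : Prop := out = temp_checker_alt min_temp temp_1 temp_2 temp_3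
instance (min_temp : Int) (temp_1 : Int) (temp_2 : Int) (temp_3 : Int) (out : Bool) : Decidable (Spec_temp_checker min_temp temp_1 temp_2 temp_3 out) := by unfold Spec_temp_checker; infer_instance

-- ===== CLAIM (what is proved, stated in full; the proofs are below) =====
def Claim_equal_temp_checker : Prop := ∀ (min_temp : Int) (temp_1 : Int) (temp_2 : Int) (temp_3 : Int), Dom_temp_checker min_temp temp_1 temp_2 temp_3 → Spec_temp_checker min_temp temp_1 temp_2 temp_3 (temp_checker min_temp temp_1 temp_2 temp_3)

-- ===== LEMMAS AND PROOFS =====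

-- ===== VERDICT (by name: the statement is the Claim_ definition above) =====
theorem temp_checker_spec : Claim_equal_temp_checker := by
  intro min_temp t1 t2 t3 _
  unfold Spec_temp_checker temp_checker temp_checker_alt
  show (if ((PySem.List.pyRange 0 (((3:Nat) : Int)) 1).foldl
      (fun n i => if PySem.List.pyGetD [t1, t2, t3] i 0 > min_temp then n + 1 else n) (0:Int)) ≥ 2
      then true else false) = _
  have hr : PySem.List.pyRange 0 (((3:Nat) : Int)) 1 = [0, 1, 2] := by decide
  rw [hr]
  by_cases h1 : t1 > min_temp <;> by_cases h2 : t2 > min_temp <;> by_cases h3 : t3 > min_temp <;>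
    simp [h1, h2, h3, PySem.List.pyGetD, PySem.List.pyGet?, PySem.List.pyIdx?]
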